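-- pv_equiv track=rewrite | github.com/klubmlodegoprogramisty/python | poziom_sredniozaawansowany/Modul_07/przestawieniowe.py | change_letters
-- ===== SOURCE A (Python) =====
-- def change_letters(text: str, codes_in: tuple, codes_out: tuple) -> str:
--     returned_text = ""
--     for letter in text:
--         if letter in codes_in:
--             pos = codes_in.index(letter)
--             letter = codes_out[pos]
--         elif letter in codes_out:
--             pos = codes_out.index(letter)
--             letter = codes_in[pos]
--         returned_text += letter
--     return returned_text
-- ===== SOURCE B (Python) =====
-- def change_letters(text: str, codes_in: tuple, codes_out: tuple) -> str:
--     # Staged sweep: for each code pair, one pass over the text that rewrites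
--     # still-unlocked cells and locks them (codes_in passes first), instead of
--     # per-character membership tests and .index scans.
--     cells = [[ch, False] for ch in text]
--     for a, b in zip(codes_in, codes_out):
--         for cell in cells:
--             if not cell[1] and cell[0] == a:
--                 cell[0] = b
--                 cell[1] = True
--     for a, b in zip(codes_out, codes_in):
--         for cell in cells:
--             if not cell[1] and cell[0] == a:
--                 cell[0] = b
--                 cell[1] = True
--     return "".join(cell[0] for cell in cells)
-- ===== Notes on version B (the rewrite author's own statement) =====
-- stated objective: alternative
-- what changed: Inverts the traversal: instead of looking up each text character in both tuples with membership tests and .index, B makes one sweep over the text per code pair (all codes_in passes first, then codes_out passes), rewriting still-unlocked cells and locking them so first-match and codes_in priority arise from pass order.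
import Mathlib
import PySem

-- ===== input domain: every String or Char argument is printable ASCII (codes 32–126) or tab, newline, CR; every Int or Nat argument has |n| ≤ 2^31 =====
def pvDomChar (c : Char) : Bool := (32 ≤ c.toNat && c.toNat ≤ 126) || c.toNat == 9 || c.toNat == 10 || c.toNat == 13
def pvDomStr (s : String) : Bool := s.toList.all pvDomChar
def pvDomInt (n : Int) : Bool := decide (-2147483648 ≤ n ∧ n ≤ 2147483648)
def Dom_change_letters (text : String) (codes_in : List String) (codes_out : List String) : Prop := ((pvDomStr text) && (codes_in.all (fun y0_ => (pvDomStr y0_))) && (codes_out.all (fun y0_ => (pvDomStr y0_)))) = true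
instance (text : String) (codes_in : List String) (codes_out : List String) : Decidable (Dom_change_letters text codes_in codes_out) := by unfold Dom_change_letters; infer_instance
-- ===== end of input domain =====

-- B inverts the traversal (one sweep over the text per code pair, with lock markers)
-- instead of per-character membership/.index scans; equivalence is about the return value.

-- ===== PORT A =====
-- transliteration of A: per character, membership test + first-index lookup in the
-- other tuple; pyGet? none (Python IndexError) is excluded by Pre_ (getD is dead there)
def change_letters (text : String) (codes_in : List String) (codes_out : List String) : String :=
  text.toList.foldl (fun returned_text c =>
    let letter := String.singleton c
    let letter' :=
      if letter ∈ codes_in then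
        match PySem.List.index? codes_in letter with
        | some pos => (PySem.List.pyGet? codes_out (pos : Int)).getD letter
        | none => letter
      else if letter ∈ codes_out then
        match PySem.List.index? codes_out letter with
        | some pos => (PySem.List.pyGet? codes_in (pos : Int)).getD letter
        | none => letter
      else letter
    returned_text ++ letter') ""

-- ===== PORT B =====
-- one cell of Source B's list: current string and the locked flag
def pvStepB (p : String × Bool) (ab : String × String) : String × Bool :=
  if p.2 = false ∧ p.1 = ab.1 then (ab.2, true) else p

def change_letters_alt (text : String) (codes_in : List String) (codes_out : List String) : String :=
  let cells0 := text.toList.map (fun ch => (String.singleton ch, false))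
  let cells1 := (codes_in.zip codes_out).foldl (fun cs ab => cs.map (fun p => pvStepB p ab)) cells0
  let cells2 := (codes_out.zip codes_in).foldl (fun cs ab => cs.map (fun p => pvStepB p ab)) cells1
  String.join (cells2.map Prod.fst)

-- ===== PRECONDITION & SPEC =====
-- whether character c goes through A's loop body without an IndexError (Bool, closed-form)
def pvOkChar_change_letters (codes_in : List String) (codes_out : List String) (c : Char) : Bool :=
  match PySem.List.index? codes_in (String.singleton c) with
  | some i => i < codes_out.length
  | none =>
    match PySem.List.index? codes_out (String.singleton c) with
    | some j => j < codes_in.length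
    | none => true

-- Pre_ excludes exactly the inputs where A raises IndexError: some character of text has its
-- first index in one code tuple at or beyond the length of the other tuple.
def Pre_change_letters (text : String) (codes_in : List String) (codes_out : List String) : Prop :=
  (text.toList.all (fun c => pvOkChar_change_letters codes_in codes_out c)) = true
instance (text : String) (codes_in : List String) (codes_out : List String) : Decidable (Pre_change_letters text codes_in codes_out) := by unfold Pre_change_letters; infer_instance

def pvWitness_change_letters : String × List String × List String := ("abc", ["a", "b"], ["x", "y"])

def Spec_change_letters (text : String) (codes_in : List String) (codes_out : List String) (out : String) : Prop := out = change_letters_alt text codes_in codes_out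
instance (text : String) (codes_in : List String) (codes_out : List String) (out : String) : Decidable (Spec_change_letters text codes_in codes_out out) := by unfold Spec_change_letters; infer_instance

-- ===== CLAIM (what is proved, stated in full; the proofs are below) =====
def Claim_equal_change_letters : Prop := ∀ (text : String) (codes_in : List String) (codes_out : List String), Dom_change_letters text codes_in codes_out → Pre_change_letters text codes_in codes_out → Spec_change_letters text codes_in codes_out (change_letters text codes_in codes_out)

-- ===== LEMMAS AND PROOFS =====

-- the staged sweeps act on each cell independently: fold of maps = map of per-cell folds
theorem pv_foldl_map_comm (pairs : List (String × String)) (cs : List (String × Bool)) :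
    pairs.foldl (fun cs ab => cs.map (fun p => pvStepB p ab)) cs
      = cs.map (fun p => pairs.foldl pvStepB p) := by
  induction pairs generalizing cs with
  | nil => simp
  | cons ab t ih => rw [List.foldl_cons, ih, List.map_map]; rfl

-- a locked cell never changes again
theorem pv_cellFold_locked (pairs : List (String × String)) (x : String) :
    pairs.foldl pvStepB (x, true) = (x, true) := by
  induction pairs with
  | nil => rfl
  | cons ab t ih => simpa [pvStepB] using ih

-- an unlocked cell whose string never occurs as a pair source stays untouched
theorem pv_cellFold_none (xs ys : List String) (s : String) (h : s ∉ xs) :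
    (xs.zip ys).foldl pvStepB (s, false) = (s, false) := by
  induction xs generalizing ys with
  | nil => rfl
  | cons x t ih =>
    rcases ys with _ | ⟨y, ys⟩
    · rfl
    · have hx : ¬ (s = x) := fun hh => h (hh ▸ List.mem_cons_self)
      simp only [List.zip_cons_cons, List.foldl_cons, pvStepB, hx, and_false, if_false]
      exact ih ys (fun hh => h (List.mem_cons_of_mem _ hh))

-- an unlocked cell is rewritten by the pass of its FIRST source index and then locked
theorem pv_cellFold_found (xs ys : List String) (s : String) (i : Nat)
    (hidx : PySem.List.index? xs s = some i) (hlen : i < ys.length) :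
    (xs.zip ys).foldl pvStepB (s, false) = (ys[i], true) := by
  induction xs generalizing ys i with
  | nil => simp [PySem.List.index?] at hidx
  | cons x t ih =>
    rcases ys with _ | ⟨y, ys⟩
    · simp at hlen
    · by_cases hx : x = s
      · subst hx
        rw [PySem.List.index?_cons_self] at hidx
        cases hidx
        have hstep : pvStepB (x, false) (x, y) = (y, true) := by simp [pvStepB]
        simp only [List.zip_cons_cons, List.foldl_cons, hstep]
        simpa using pv_cellFold_locked (t.zip ys) y
      · rw [PySem.List.index?_cons_of_ne t hx] at hidx
        rcases h' : PySem.List.index? t s with _ | j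
        · rw [h'] at hidx; simp at hidx
        · rw [h'] at hidx
          simp only [Option.map_some] at hidx
          cases hidx
          have hx' : ¬ (s = x) := fun hh => hx hh.symm
          simp only [List.zip_cons_cons, List.foldl_cons, pvStepB, hx', and_false, if_false]
          have := ih ys j h' (by simpa using hlen)
          simpa using this

theorem pv_join_map_eq_foldl (f : Char → String) (l : List Char) (acc : String) :
    l.foldl (fun a c => a ++ f c) acc = acc ++ String.join (l.map f) := by
  induction l generalizing acc with
  | nil => simp [String.join]
  | cons c t ih =>
    rw [List.foldl_cons, ih, List.map_cons]
    have hj : String.join (f c :: List.map f t) = f c ++ String.join (List.map f t) := by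
      have h2 : ∀ (L : List String) (a b : String),
          List.foldl (fun r s => r ++ s) (a ++ b) L = a ++ List.foldl (fun r s => r ++ s) b L := by
        intro L
        induction L with
        | nil => intro a b; rfl
        | cons x L ihL => intro a b; simp only [List.foldl_cons, String.append_assoc, ihL]
      have h3 := h2 (List.map f t) (f c) ""
      have e : ("" : String) ++ f c = f c ++ "" := by simp
      show List.foldl (fun r s => r ++ s) ("" ++ f c) (List.map f t) = _
      rw [e, h3]
      rfl
    rw [hj, String.append_assoc]

theorem change_letters_spec : Claim_equal_change_letters := by
  intro text codes_in codes_out _hdom hpre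
  unfold Pre_change_letters at hpre
  rw [List.all_eq_true] at hpre
  unfold Spec_change_letters change_letters change_letters_alt
  rw [pv_join_map_eq_foldl]
  simp only [String.empty_append, pv_foldl_map_comm, List.map_map]
  apply congrArg String.join
  apply List.map_congr_left
  intro c hc
  have hok := hpre c hc
  unfold pvOkChar_change_letters at hok
  set s := String.singleton c with hs
  show _ = ((codes_out.zip codes_in).foldl pvStepB
      ((codes_in.zip codes_out).foldl pvStepB (s, false))).fst
  rcases h1 : PySem.List.index? codes_in s with _ | i
  · have hnotin : s ∉ codes_in := (PySem.List.index?_eq_none_iff _ _).1 h1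
    rcases h2 : PySem.List.index? codes_out s with _ | j
    · -- character in neither tuple: both sweeps leave the cell untouched
      have hnotout : s ∉ codes_out := (PySem.List.index?_eq_none_iff _ _).1 h2
      rw [if_neg hnotin, if_neg hnotout,
          pv_cellFold_none _ _ _ hnotin, pv_cellFold_none _ _ _ hnotout]
    · -- character first found in codes_out at j, j < |codes_in| by Pre_
      rw [h1, h2] at hok
      have hok' : j < codes_in.length := by simpa using hok
      have hin : s ∈ codes_out := (PySem.List.index?_isSome_iff _ _).1 (by rw [h2]; rfl)
      rw [if_neg hnotin, if_pos hin]
      show (PySem.List.pyGet? codes_in (j : Int)).getD s = _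
      rw [pv_cellFold_none _ _ _ hnotin, pv_cellFold_found _ _ _ _ h2 hok',
          PySem.List.pyGet?_natCast, List.getElem?_eq_getElem hok']
      rfl
  · -- character first found in codes_in at i, i < |codes_out| by Pre_
    rw [h1] at hok
    have hok' : i < codes_out.length := by simpa using hok
    have hin : s ∈ codes_in := (PySem.List.index?_isSome_iff _ _).1 (by rw [h1]; rfl)
    rw [if_pos hin]
    show (PySem.List.pyGet? codes_out (i : Int)).getD s = _
    rw [pv_cellFold_found _ _ _ _ h1 hok', pv_cellFold_locked,
        PySem.List.pyGet?_natCast, List.getElem?_eq_getElem hok']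
    rfl
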